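-- pv_equiv track=rewrite | github.com/sarwarbeing-ai/Scaler | scaler/Data Structure and Algorithms Python/littlePonny2subsequence.py | solve
-- ===== SOURCE A (Python) =====
-- def solve(A):
--     if len(A)==1:
--         return ""
--     d=[]
--     for i in range(len(A)):
--         d.append((i,A[i]))
--     d.sort(key=lambda x:x[1])
--     if d[0][0]<d[1][0]:
--         return d[0][1]+d[1][1]
--
--     m=d[0]
--     for idx,l in d[1:]:
--         if m[0]>idx:
--             continue
--         else:
--             return  m[1]+l
--     return d[1][1]+m[1]
-- ===== SOURCE B (Python) =====
-- def solve(A):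
--     if len(A) == 1:
--         return ""
--     first = min(A[:-1])
--     i = A.index(first)
--     return first + min(A[i+1:])
-- ===== Notes on version B (the rewrite author's own statement) =====
-- stated objective: faster
-- what changed: B drops A's build-and-stable-sort of all (index, char) pairs and instead takes min(A[:-1]), its first index, and min of the suffix after it — three linear passes, no sort.
-- outside the precondition, e.g. on solve(''): A raises IndexError, B raises ValueError
import Mathlib
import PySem

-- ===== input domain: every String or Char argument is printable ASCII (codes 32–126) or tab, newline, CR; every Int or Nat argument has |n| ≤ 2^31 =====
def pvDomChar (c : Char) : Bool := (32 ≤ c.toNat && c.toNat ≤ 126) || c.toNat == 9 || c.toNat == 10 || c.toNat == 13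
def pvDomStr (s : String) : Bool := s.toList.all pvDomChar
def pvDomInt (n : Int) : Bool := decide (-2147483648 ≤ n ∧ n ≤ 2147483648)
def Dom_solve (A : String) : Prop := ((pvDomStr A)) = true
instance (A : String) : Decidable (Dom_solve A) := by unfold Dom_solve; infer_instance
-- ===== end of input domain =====

-- B replaces A's sort of (index, char) pairs by three linear passes (min of A[:-1], its first index, min of the suffix); same result, no sort.

-- ===== PORT A =====
-- the 'for idx,l in d[1:]' loop of A: first pair whose index is not below m's index
def solveLoopA (m : Int × Char) : List (Int × Char) → Option String
  | [] => none
  | p :: rest => if m.1 > p.1 then solveLoopA m rest else some (String.ofList [m.2, p.2])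

def solve (A : String) : String :=
  let s := A.toList
  if s.length = 1 then "" else
    let d : List (Int × Char) :=
      (PySem.List.pyRange 0 s.length 1).foldl
        (fun acc i => acc ++ [(i, PySem.List.pyGetD s i ' ')]) []
    let ds := PySem.List.sorted d (fun x => x.2) false
    let d0 := PySem.List.pyGetD ds 0 ((0 : Int), ' ')
    let d1 := PySem.List.pyGetD ds 1 ((0 : Int), ' ')
    if d0.1 < d1.1 then String.ofList [d0.2, d1.2]
    else
      match solveLoopA d0 (PySem.List.slice ds (some 1) none) with
      | some r => r
      | none => String.ofList [d1.2, d0.2]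

-- ===== PORT B =====
def solve_alt (A : String) : String :=
  let s := A.toList
  if s.length = 1 then "" else
    let first := (PySem.List.min? (PySem.List.slice s none (some (-1))) (fun c => c)).getD ' '
    let i := (PySem.List.index? s first).getD 0
    let second := (PySem.List.min? (PySem.List.slice s (some ((i : Int) + 1)) none) (fun c => c)).getD ' '
    String.ofList [first, second]

-- ===== PRECONDITION & SPEC =====
-- Pre_ excludes only the empty string, on which A raises IndexError (d[0] of an empty list) and B raises ValueError (min of an empty sequence).
def Pre_solve (A : String) : Prop := A ≠ ""
instance (A : String) : Decidable (Pre_solve A) := by unfold Pre_solve; infer_instance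
def pvWitness_solve : String := "ab"

def Spec_solve (A : String) (out : String) : Prop := out = solve_alt A
instance (A : String) (out : String) : Decidable (Spec_solve A out) := by unfold Spec_solve; infer_instance

-- ===== CLAIM (what is proved, stated in full; the proofs are below) =====
def Claim_equal_solve : Prop := ∀ (A : String), Dom_solve A → Pre_solve A → Spec_solve A (solve A)

-- ===== LEMMAS AND PROOFS =====

-- stability order of A's sort: strictly increasing in (char, original index)
def PLex (a b : Int × Char) : Prop := a.2 < b.2 ∨ (a.2 = b.2 ∧ a.1 < b.1)

theorem insertBy_pairwise (x : Int × Char) (acc : List (Int × Char))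
    (hacc : acc.Pairwise PLex) (h : ∀ y ∈ acc, y.1 < x.1) :
    (PySem.List.insertBy (fun a b => decide (a.2 < b.2)) x acc).Pairwise PLex := by
  induction acc with
  | nil => simp [PySem.List.insertBy]
  | cons y ys ih =>
    rw [List.pairwise_cons] at hacc
    by_cases hb : x.2 < y.2
    · have : PySem.List.insertBy (fun a b => decide (a.2 < b.2)) x (y :: ys) = x :: y :: ys := by
        simp [PySem.List.insertBy, hb]
      rw [this, List.pairwise_cons]
      refine ⟨?_, by rw [List.pairwise_cons]; exact hacc⟩
      intro z hz
      rcases List.mem_cons.1 hz with rfl | hz'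
      · exact Or.inl hb
      · have := hacc.1 z hz'
        rcases this with h1 | ⟨h1, _⟩
        · exact Or.inl (lt_trans hb h1)
        · exact Or.inl (h1 ▸ hb)
    · have : PySem.List.insertBy (fun a b => decide (a.2 < b.2)) x (y :: ys) =
        y :: PySem.List.insertBy (fun a b => decide (a.2 < b.2)) x ys := by
        simp [PySem.List.insertBy, hb]
      rw [this, List.pairwise_cons]
      constructor
      · intro z hz
        rcases (PySem.List.mem_insertBy _ _ _ _).1 hz with rfl | hz'
        · rcases lt_or_eq_of_le (not_lt.1 hb) with h1 | h1
          · exact Or.inl h1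
          · exact Or.inr ⟨h1, h y (List.mem_cons_self) ⟩
        · exact hacc.1 z hz'
      · exact ih hacc.2 (fun z hz => h z (List.mem_cons_of_mem _ hz))

theorem foldl_insertBy_pairwise (xs : List (Int × Char)) :
    ∀ (acc : List (Int × Char)), acc.Pairwise PLex →
    (∀ y ∈ acc, ∀ x ∈ xs, y.1 < x.1) →
    xs.Pairwise (fun a b => a.1 < b.1) →
    (xs.foldl (fun acc x => PySem.List.insertBy (fun a b => decide (a.2 < b.2)) x acc) acc).Pairwise PLex := by
  induction xs with
  | nil => intro acc h _ _; simpa using h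
  | cons x xs ih =>
    intro acc hacc hfut hxs
    rw [List.pairwise_cons] at hxs
    simp only [List.foldl_cons]
    refine ih _ (insertBy_pairwise x acc hacc (fun y hy => hfut y hy x List.mem_cons_self)) ?_ hxs.2
    intro y hy z hz
    rcases (PySem.List.mem_insertBy _ _ _ _).1 hy with rfl | hy'
    · exact hxs.1 z hz
    · exact hfut y hy' z (List.mem_cons_of_mem _ hz)

theorem sorted_snd_pairwise (xs : List (Int × Char))
    (h : xs.Pairwise (fun a b => a.1 < b.1)) :
    (PySem.List.sorted xs (fun x => x.2) false).Pairwise PLex := by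
  rw [PySem.List.sorted_eq_foldl_insertBy]
  exact foldl_insertBy_pairwise xs [] List.Pairwise.nil (by simp) h

-- the min?-value of a list is any member below all members
theorem min?_getD_eq {xs : List Char} {v d : Char}
    (hv : v ∈ xs) (hmin : ∀ y ∈ xs, v ≤ y) :
    (PySem.List.min? xs (fun c => c)).getD d = v := by
  cases hm : PySem.List.min? xs (fun c => c) with
  | none => exact absurd ((PySem.List.min?_eq_none_iff xs _).1 hm ▸ hv) (List.not_mem_nil)
  | some m =>
    have h1 : m ≤ v := PySem.List.min?_isMin hm v hv
    have h2 : v ≤ m := hmin m (PySem.List.min?_mem hm)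
    simpa using le_antisymm h1 h2

theorem index?_eq_some_of {s : List Char} {c : Char} {k : Nat}
    (hk : k < s.length) (hget : s[k] = c) (hfirst : ∀ j (hj : j < k), s[j] ≠ c) :
    PySem.List.index? s c = some k := by
  rw [PySem.List.index?_eq_some_iff]
  refine ⟨s.take k, s.drop (k + 1), ?_, by simp [hk.le], ?_⟩
  · conv_lhs => rw [← List.take_append_drop k s]
    rw [List.drop_eq_getElem_cons hk, hget]
  · intro hc
    obtain ⟨j, hj, hj2⟩ := List.getElem_of_mem hc
    have hjk : j < k := by rw [List.length_take] at hj; omega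
    exact hfirst j hjk (by rw [← hj2]; simp [List.getElem_take])

-- membership in drop as indexed elements
theorem mem_drop_iff {s : List Char} {m : Nat} {y : Char} :
    y ∈ s.drop m ↔ ∃ k, ∃ h : k < s.length, m ≤ k ∧ s[k] = y := by
  constructor
  · intro hy
    obtain ⟨j, hj, hj2⟩ := List.getElem_of_mem hy
    have hj' : m + j < s.length := by rw [List.length_drop] at hj; omega
    refine ⟨m + j, hj', by omega, ?_⟩
    rw [← hj2, List.getElem_drop]
  · rintro ⟨k, hk, hmk, rfl⟩
    have hk2 : k - m < (s.drop m).length := by rw [List.length_drop]; omega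
    have : s[k] = (s.drop m)[k - m]'hk2 := by
      rw [List.getElem_drop]; congr 1; omega
    rw [this]; exact List.getElem_mem _

theorem solveLoopA_none (m : Int × Char) (l : List (Int × Char))
    (h : ∀ q ∈ l, q.1 < m.1) : solveLoopA m l = none := by
  induction l with
  | nil => rfl
  | cons q l ih =>
    have hq : q.1 < m.1 := h q List.mem_cons_self
    simp only [solveLoopA, if_pos hq]
    exact ih (fun r hr => h r (List.mem_cons_of_mem _ hr))

theorem solveLoopA_some (m : Int × Char) (l : List (Int × Char))
    (hpw : l.Pairwise PLex) (hne : ∀ q ∈ l, q.1 ≠ m.1) (hex : ∃ q ∈ l, m.1 < q.1) :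
    ∃ p ∈ l, solveLoopA m l = some (String.ofList [m.2, p.2]) ∧ m.1 < p.1 ∧
      ∀ q ∈ l, m.1 < q.1 → p.2 ≤ q.2 := by
  induction l with
  | nil => simp at hex
  | cons q0 l ih =>
    rw [List.pairwise_cons] at hpw
    by_cases hq0 : m.1 > q0.1
    · have hex' : ∃ q ∈ l, m.1 < q.1 := by
        obtain ⟨q, hq, hlt⟩ := hex
        rcases List.mem_cons.1 hq with rfl | hq'
        · omega
        · exact ⟨q, hq', hlt⟩
      obtain ⟨p, hp, heq, hlt, hmin⟩ := ih hpw.2 (fun r hr => hne r (List.mem_cons_of_mem _ hr)) hex'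
      refine ⟨p, List.mem_cons_of_mem _ hp, ?_, hlt, ?_⟩
      · simp only [solveLoopA, if_pos hq0]; exact heq
      · intro r hr hmr
        rcases List.mem_cons.1 hr with rfl | hr'
        · omega
        · exact hmin r hr' hmr
    · have hlt : m.1 < q0.1 :=
        lt_of_le_of_ne (not_lt.1 hq0) (Ne.symm (hne q0 List.mem_cons_self))
      refine ⟨q0, List.mem_cons_self, ?_, hlt, ?_⟩
      · simp only [solveLoopA, if_neg hq0]
      · intro r hr _
        rcases List.mem_cons.1 hr with rfl | hr'
        · exact le_refl _
        · rcases hpw.1 r hr' with h1 | ⟨h1, _⟩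
          · exact le_of_lt h1
          · exact le_of_eq h1

-- main equivalence
theorem solve_eq_alt (A : String) (hA : A ≠ "") : solve A = solve_alt A := by
  unfold solve solve_alt
  set s := A.toList with hs
  have hsne : s ≠ [] := by
    rw [hs]
    intro h
    apply hA
    have := congrArg String.ofList h
    simpa using this
  by_cases h1 : s.length = 1
  · simp [h1]
  · simp only [if_neg h1]
    have hn2 : 2 ≤ s.length := by
      have := List.length_pos_iff.2 hsne; omega
    set n := s.length with hn
    have hd : (PySem.List.pyRange 0 (s.length) 1).foldl
        (fun acc i => acc ++ [(i, PySem.List.pyGetD s i ' ')]) ([] : List (Int × Char))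
        = PySem.List.enumerate s 0 := by
      rw [PySem.List.foldl_append_singleton_eq_map, PySem.List.enumerate_eq_map_pyRange s ' ']
      simp [PySem.List.len]
    rw [hd]
    set d := PySem.List.enumerate s 0 with hdd
    set ds := PySem.List.sorted d (fun x => x.2) false with hds
    have hperm : ds.Perm d := PySem.List.sorted_perm d _ _
    have hpw : ds.Pairwise PLex :=
      sorted_snd_pairwise d (PySem.List.pairwise_lt_enumerate s 0)
    have hlen : ds.length = n := by rw [hds, PySem.List.length_sorted, hdd, PySem.List.length_enumerate]
    have hmem : ∀ p ∈ ds, ∃ k, ∃ h : k < n, p = ((k : Int), s[k]) := by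
      intro p hp
      have := (PySem.List.mem_enumerate_iff s 0 p).1 (hperm.mem_iff.1 hp)
      obtain ⟨k, hk, hpk⟩ := this
      exact ⟨k, hk, by simpa using hpk⟩
    have hmem' : ∀ k, ∀ h : k < n, ((k : Int), s[k]) ∈ ds := by
      intro k hk
      exact hperm.mem_iff.2 ((PySem.List.mem_enumerate_iff s 0 _).2 ⟨k, hk, by simp⟩)
    have hnd : ds.Nodup := by
      refine hperm.nodup_iff.2 ?_
      have := PySem.List.pairwise_lt_enumerate s 0
      exact List.Pairwise.imp (fun h => by intro he; rw [he] at h; exact lt_irrefl _ h) this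
    -- destructure ds
    have hds0 : ds ≠ [] := by intro h; rw [h] at hlen; simp at hlen; omega
    obtain ⟨e0, t, ht⟩ := List.exists_cons_of_ne_nil hds0
    have ht0 : t ≠ [] := by intro h; rw [ht, h] at hlen; simp at hlen; omega
    obtain ⟨e1, rest, hrest⟩ := List.exists_cons_of_ne_nil ht0
    rw [hrest] at ht
    obtain ⟨k0, hk0, he0⟩ := hmem e0 (ht ▸ List.mem_cons_self)
    obtain ⟨k1, hk1, he1⟩ := hmem e1 (ht ▸ List.mem_cons_of_mem _ List.mem_cons_self)
    subst he0
    subst he1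
    have hpw2 := ht ▸ hpw
    rw [List.pairwise_cons] at hpw2
    obtain ⟨hpw0, hpwt⟩ := hpw2
    have hpw3 := hpwt
    rw [List.pairwise_cons] at hpw3
    obtain ⟨hpw1, _⟩ := hpw3
    have hnd2 := ht ▸ hnd
    rw [List.nodup_cons] at hnd2
    have hP01 : PLex ((k0 : Int), s[k0]) ((k1 : Int), s[k1]) := hpw0 _ List.mem_cons_self
    have hk01 : k0 ≠ k1 := by
      intro h
      rcases hP01 with h' | ⟨_, h'⟩
      · simp [h] at h'
      · simp [h] at h'
    -- tail membership of every index other than k0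
    have htail : ∀ j, ∀ hj : j < n, j ≠ k0 →
        ((j : Int), s[j]) ∈ ((k1 : Int), s[k1]) :: rest := by
      intro j hj hjk
      have := hmem' j hj
      rw [ht] at this
      rcases List.mem_cons.1 this with hq | hq
      · exfalso; have := congrArg Prod.fst hq; simp at this; omega
      · exact hq
    -- e0's char is the global minimum
    have hmin : ∀ j, ∀ hj : j < n, s[k0] ≤ s[j] := by
      intro j hj
      by_cases hjk : j = k0
      · subst hjk; exact le_refl _
      · rcases hpw0 _ (htail j hj hjk) with h' | ⟨h', _⟩
        · exact le_of_lt h'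
        · exact le_of_eq h'
    -- k0 is the first position of that char
    have hfirst : ∀ j, ∀ hj : j < n, j < k0 → s[j] ≠ s[k0] := by
      intro j hj hjk0 hje
      have hjk : j ≠ k0 := by omega
      rcases hpw0 _ (htail j hj hjk) with h' | ⟨h', h''⟩
      · simp at h'; exact absurd hje (ne_of_gt h')
      · simp at h''; omega
    -- e1's char is minimal among all positions other than k0
    have hmin1 : ∀ j, ∀ hj : j < n, j ≠ k0 → s[k1] ≤ s[j] := by
      intro j hj hjk
      rcases List.mem_cons.1 (htail j hj hjk) with hq | hq
      · have := congrArg Prod.snd hq; simp at this; exact le_of_eq this.symm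
      · rcases hpw1 _ hq with h' | ⟨h', _⟩
        · exact le_of_lt h'
        · exact le_of_eq h'
    -- evaluate the two pyGetD
    have hget0 : PySem.List.pyGetD ds 0 ((0 : Int), ' ') = ((k0 : Int), s[k0]) := by
      rw [ht, PySem.List.pyGetD_ofNat']; rfl
    have hget1 : PySem.List.pyGetD ds 1 ((0 : Int), ' ') = ((k1 : Int), s[k1]) := by
      rw [ht, PySem.List.pyGetD_ofNat']; rfl
    rw [hget0, hget1]
    rw [PySem.List.slice_from_one, ht]
    simp only [List.tail_cons]
    rw [PySem.List.slice_to_neg_one]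
    -- B's dropLast membership characterization
    have hdl : ∀ y : Char, y ∈ s.dropLast ↔ ∃ k, ∃ h : k < n, k < n - 1 ∧ s[k] = y := by
      intro y
      constructor
      · intro hy
        obtain ⟨j, hj, hj2⟩ := List.getElem_of_mem hy
        have hjlt : j < n - 1 := by rw [List.length_dropLast] at hj; omega
        refine ⟨j, by omega, hjlt, ?_⟩
        rw [← hj2, List.getElem_dropLast]
      · rintro ⟨k, hk, hk1, rfl⟩
        have hk2 : k < s.dropLast.length := by rw [List.length_dropLast]; omega
        rw [← List.getElem_dropLast (h := hk2)]
        exact List.getElem_mem _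
    have hcond : (((k0 : Int), s[k0]).1 < ((k1 : Int), s[k1]).1) ↔ k0 < k1 := by simp
    by_cases hc : k0 < k1
    · -- k0 < k1 : A returns s[k0] ++ s[k1]
      rw [if_pos (hcond.2 hc)]
      have hk0n : k0 < n - 1 := by omega
      have hfst : (PySem.List.min? s.dropLast (fun c => c)).getD ' ' = s[k0] := by
        apply min?_getD_eq
        · exact (hdl _).2 ⟨k0, hk0, hk0n, rfl⟩
        · intro y hy; obtain ⟨k, hk, _, rfl⟩ := (hdl y).1 hy; exact hmin k hk
      rw [hfst]
      have hidx : PySem.List.index? s (s[k0]) = some k0 :=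
        index?_eq_some_of hk0 rfl (fun j hj => hfirst j (by omega) hj)
      rw [hidx]
      simp only [Option.getD_some]
      rw [show ((k0 : Int) + 1) = ((k0 + 1 : Nat) : Int) by push_cast; ring,
        PySem.List.slice_from_natCast]
      have hsnd : (PySem.List.min? (s.drop (k0 + 1)) (fun c => c)).getD ' ' = s[k1] := by
        apply min?_getD_eq
        · exact mem_drop_iff.2 ⟨k1, hk1, by omega, rfl⟩
        · intro y hy
          obtain ⟨k, hk, hkk, rfl⟩ := mem_drop_iff.1 hy
          exact hmin1 k hk (by omega)
      rw [hsnd]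
    · -- k1 < k0
      rw [if_neg (fun h => hc (hcond.1 h))]
      have hk10 : k1 < k0 := by omega
      -- every index in the tail differs from k0
      have hneidx : ∀ q ∈ ((k1 : Int), s[k1]) :: rest, q.1 ≠ ((k0 : Int), s[k0]).1 := by
        intro q hq he
        obtain ⟨kq, hkq, hqk⟩ := hmem q (ht ▸ List.mem_cons_of_mem _ hq)
        have hkqk0 : kq = k0 := by rw [hqk] at he; simpa using he
        subst hkqk0
        rw [hqk] at hq
        exact hnd2.1 hq
      by_cases hlast : k0 = n - 1
      · -- min char only at the last position: A's loop finds nothing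
        have hnone : solveLoopA ((k0 : Int), s[k0]) (((k1 : Int), s[k1]) :: rest) = none := by
          apply solveLoopA_none
          intro q hq
          obtain ⟨kq, hkq, hqk⟩ := hmem q (ht ▸ List.mem_cons_of_mem _ hq)
          have hkqn : kq ≠ k0 := fun h => hneidx q hq (by rw [hqk]; simp [h])
          rw [hqk]; simp; omega
        rw [hnone]
        have hfst : (PySem.List.min? s.dropLast (fun c => c)).getD ' ' = s[k1] := by
          apply min?_getD_eq
          · exact (hdl _).2 ⟨k1, hk1, by omega, rfl⟩
          · intro y hy
            obtain ⟨k, hk, hkn1, rfl⟩ := (hdl y).1 hy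
            exact hmin1 k hk (by omega)
        rw [hfst]
        have hsome : (PySem.List.index? s (s[k1])).isSome := by
          rw [PySem.List.index?_isSome_iff]; exact List.getElem_mem _
        obtain ⟨j1, hj1⟩ := Option.isSome_iff_exists.1 hsome
        obtain ⟨hj1n, hj1get, hj1first⟩ := PySem.List.getElem_of_index?_eq_some hj1
        have hj1k1 : j1 ≤ k1 := by
          by_contra h
          exact hj1first k1 (by omega) rfl
        rw [hj1]
        simp only [Option.getD_some]
        rw [show ((j1 : Int) + 1) = ((j1 + 1 : Nat) : Int) by push_cast; ring,
          PySem.List.slice_from_natCast]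
        have hsnd : (PySem.List.min? (s.drop (j1 + 1)) (fun c => c)).getD ' ' = s[k0] := by
          apply min?_getD_eq
          · exact mem_drop_iff.2 ⟨k0, hk0, by omega, rfl⟩
          · intro y hy
            obtain ⟨k, hk, _, rfl⟩ := mem_drop_iff.1 hy
            exact hmin k hk
        rw [hsnd]
      · -- min char at k0 < n-1 : A's loop finds the min char of the suffix
        have hk0n : k0 < n - 1 := by omega
        have hmemk01 : ((((k0 + 1 : Nat)) : Int), s[k0+1]'(by omega)) ∈ ((k1 : Int), s[k1]) :: rest :=
          htail (k0 + 1) (by omega) (by omega)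
        obtain ⟨p, hp, heq, hplt, hpmin⟩ := solveLoopA_some ((k0 : Int), s[k0])
          (((k1 : Int), s[k1]) :: rest) hpwt hneidx
          ⟨((((k0 + 1 : Nat)) : Int), s[k0+1]'(by omega)), hmemk01, by simp⟩
        rw [heq]
        obtain ⟨kp, hkp, hpk⟩ := hmem p (ht ▸ List.mem_cons_of_mem _ hp)
        have hfst : (PySem.List.min? s.dropLast (fun c => c)).getD ' ' = s[k0] := by
          apply min?_getD_eq
          · exact (hdl _).2 ⟨k0, hk0, hk0n, rfl⟩
          · intro y hy; obtain ⟨k, hk, _, rfl⟩ := (hdl y).1 hy; exact hmin k hk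
        rw [hfst]
        have hidx : PySem.List.index? s (s[k0]) = some k0 :=
          index?_eq_some_of hk0 rfl (fun j hj => hfirst j (by omega) hj)
        rw [hidx]
        simp only [Option.getD_some]
        rw [show ((k0 : Int) + 1) = ((k0 + 1 : Nat) : Int) by push_cast; ring,
          PySem.List.slice_from_natCast]
        have hkpk0 : k0 < kp := by
          rw [hpk] at hplt; simp at hplt; omega
        have hsnd : (PySem.List.min? (s.drop (k0 + 1)) (fun c => c)).getD ' ' = p.2 := by
          apply min?_getD_eq
          · rw [hpk]; exact mem_drop_iff.2 ⟨kp, hkp, by omega, rfl⟩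
          · intro y hy
            obtain ⟨k, hk, hkk, rfl⟩ := mem_drop_iff.1 hy
            exact hpmin _ (htail k hk (by omega)) (by simp; omega)
        rw [hsnd]

-- ===== VERDICT (by name: the statement is the Claim_ definition above) =====
theorem solve_spec : Claim_equal_solve := by
  intro A _ hpre
  unfold Spec_solve
  exact solve_eq_alt A hpre
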